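-- pv_equiv track=rewrite | github.com/ZachAR3/C_Homework_Checker | week4_p2_case.py | _expected_zigzag
-- ===== SOURCE A (Python) =====
-- def _expected_zigzag(text: str):
--     """
--     Generates expected zig-zag output:
--     - Alternate indentation for letters.
--     - Blank line for spaces.
--     - Indentation resets after a space.
--     """
--     lines = []
--     indent = False  # False = no indent, True = one space
--     for c in text:
--         if c == '\n':
--             break
--         if c == ' ':
--             lines.append("")      # blank line for space
--             indent = False        # reset indentation after space
--             continue
--         line = (' ' if indent else '') + c
--         lines.append(line)
--         indent = not indent       # toggle after printing each letter
--     return lines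
-- ===== SOURCE B (Python) =====
-- def _expected_zigzag(text: str):
--     head = text.split('\n', 1)[0]
--     out = []
--     for wi, word in enumerate(head.split(' ')):
--         if wi:
--             out.append("")
--         for i, c in enumerate(word):
--             out.append((" " if i % 2 else "") + c)
--     return out
-- ===== Notes on version B (the rewrite author's own statement) =====
-- stated objective: alternative
-- what changed: Replaces A's single stateful pass with a toggling indent flag by a word-based decomposition: truncate at the first newline, split on spaces, emit a blank line between words and indent each word's characters by index parity.
import Mathlib
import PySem

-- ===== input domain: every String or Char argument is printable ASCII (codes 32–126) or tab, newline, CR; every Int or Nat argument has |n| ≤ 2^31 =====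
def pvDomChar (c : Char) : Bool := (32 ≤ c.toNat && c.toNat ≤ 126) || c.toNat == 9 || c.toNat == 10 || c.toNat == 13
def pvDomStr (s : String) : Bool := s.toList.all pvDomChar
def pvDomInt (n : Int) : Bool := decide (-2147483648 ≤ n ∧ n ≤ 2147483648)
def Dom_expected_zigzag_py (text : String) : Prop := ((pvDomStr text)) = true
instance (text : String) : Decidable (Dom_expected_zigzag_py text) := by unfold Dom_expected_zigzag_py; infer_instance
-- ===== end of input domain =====

-- B replaces A's single toggling-flag pass by a word-based decomposition (truncate at
-- newline, split on spaces, parity-indexed indentation per word); alternative, same cost.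

-- ===== PORT A =====
-- A's for-loop over the characters with state (lines, indent); 'break' at '\n',
-- blank line + reset at ' ', otherwise emit and toggle.  The loop is the structural
-- recursion zzA over the remaining characters, emitting lines in order.
def zzA : List Char → Bool → List String
  | [], _ => []
  | c :: rest, indent =>
    if c = '\n' then []
    else if c = ' ' then "" :: zzA rest false
    else ((if indent then " " else "") ++ String.singleton c) :: zzA rest (!indent)

def expected_zigzag_py (text : String) : List String :=
  zzA text.toList false

-- ===== PORT B =====
-- head = text.split('\n', 1)[0]
def zzHead : List Char → List Char
  | [] => []
  | c :: r => if c = '\n' then [] else c :: zzHead r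

-- head.split(' ')
def zzSplit : List Char → List (List Char)
  | [] => [[]]
  | c :: r =>
    if c = ' ' then [] :: zzSplit r
    else match zzSplit r with
      | w :: ws => (c :: w) :: ws
      | [] => [[c]]

-- inner loop: for i, c in enumerate(word): (" " if i % 2 else "") + c
def zzWordLines : Nat → List Char → List String
  | _, [] => []
  | i, c :: r => ((if i % 2 = 1 then " " else "") ++ String.singleton c) :: zzWordLines (i + 1) r

-- outer loop: blank line before every word after the first
def zzJoin : List (List Char) → List String
  | [] => []
  | w :: ws => zzWordLines 0 w ++ ws.flatMap (fun w' => "" :: zzWordLines 0 w')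

def expected_zigzag_py_alt (text : String) : List String :=
  zzJoin (zzSplit (zzHead text.toList))

-- ===== PRECONDITION & SPEC =====
def Spec_expected_zigzag_py (text : String) (out : List String) : Prop := out = expected_zigzag_py_alt text
instance (text : String) (out : List String) : Decidable (Spec_expected_zigzag_py text out) := by unfold Spec_expected_zigzag_py; infer_instance

-- ===== CLAIM (what is proved, stated in full; the proofs are below) =====
def Claim_equal_expected_zigzag_py : Prop := ∀ (text : String), Dom_expected_zigzag_py text → Spec_expected_zigzag_py text (expected_zigzag_py text)

-- ===== LEMMAS AND PROOFS =====

theorem zzSplit_ne_nil (l : List Char) : zzSplit l ≠ [] := by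
  cases l with
  | nil => simp [zzSplit]
  | cons c r =>
    simp only [zzSplit]
    split
    · simp
    · cases h : zzSplit r <;> simp

theorem zz_parity_flip (n : Nat) : decide ((n + 1) % 2 = 1) = !decide (n % 2 = 1) := by
  by_cases h : n % 2 = 1 <;> simp [h] <;> omega

theorem zzA_eq (l : List Char) (n : Nat) :
    zzA l (decide (n % 2 = 1)) =
      match zzSplit (zzHead l) with
      | [] => []
      | w :: ws => zzWordLines n w ++ ws.flatMap (fun w' => "" :: zzWordLines 0 w') := by
  induction l generalizing n with
  | nil => simp [zzA, zzHead, zzSplit, zzWordLines]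
  | cons c r ih =>
    by_cases hnl : c = '\n'
    · simp [zzA, zzHead, zzSplit, zzWordLines, hnl]
    · by_cases hsp : c = ' '
      · subst hsp
        have h0 := ih 0
        cases hs : zzSplit (zzHead r) with
        | nil => exact absurd hs (zzSplit_ne_nil _)
        | cons w ws =>
          simp only [hs, show decide ((0:Nat) % 2 = 1) = false from rfl] at h0
          simp [zzA, zzHead, zzSplit, hs, zzWordLines, h0]
      · have h1 := ih (n + 1)
        rw [zz_parity_flip] at h1
        simp only [zzA, zzHead, zzSplit, hnl, hsp, if_false]
        cases hs : zzSplit (zzHead r) with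
        | nil => exact absurd hs (zzSplit_ne_nil _)
        | cons w ws =>
          simp only [hs] at h1 ⊢
          simp [zzWordLines, h1]

-- ===== VERDICT (by name: the statement is the Claim_ definition above) =====
theorem expected_zigzag_py_spec : Claim_equal_expected_zigzag_py := by
  intro text _
  unfold Spec_expected_zigzag_py expected_zigzag_py expected_zigzag_py_alt
  have h := zzA_eq text.toList 0
  simp only [show decide ((0 : Nat) % 2 = 1) = false from rfl] at h
  rw [h]
  cases hs : zzSplit (zzHead text.toList) with
  | nil => exact absurd hs (zzSplit_ne_nil _)
  | cons w ws => simp [zzJoin]
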